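-- pv_equiv track=rewrite | github.com/walberamorim/bibliotecario.chain | processar_artigos.py | eliminar_classes_gramaticais
-- ===== SOURCE A (Python) =====
-- CLASSES_GRAMATICAIS_INDESEJADAS = [
--     "adv",
--     "v-inf",
--     "v-fin",
--     "v-pcp",
--     "v-ger",
--     "num",
--     "adj"
-- ]
--
-- def eliminar_classes_gramaticais(tokens, classificacoes):
--     tokens_filtrados = []
--
--     for token in tokens:
--         if token in classificacoes.keys():
--             classificacao = classificacoes[token]
--             if not any (s in classificacao for s in CLASSES_GRAMATICAIS_INDESEJADAS):
--                 tokens_filtrados.append(token)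
--         else:
--             tokens_filtrados.append(token)
--
--     return tokens_filtrados
-- ===== SOURCE B (Python) =====
-- CLASSES_GRAMATICAIS_INDESEJADAS = [
--     "adv",
--     "v-inf",
--     "v-fin",
--     "v-pcp",
--     "v-ger",
--     "num",
--     "adj"
-- ]
--
-- def eliminar_classes_gramaticais(tokens, classificacoes):
--     drop = {tok for tok, cls in classificacoes.items()
--             if any(s in cls for s in CLASSES_GRAMATICAIS_INDESEJADAS)}
--     return [t for t in tokens if t not in drop]
-- ===== Notes on version B (the rewrite author's own statement) =====
-- stated objective: idiomatic
-- what changed: B precomputes the set of tokens to drop in one pass over the dict items, then filters the token list with a set-membership test, instead of interleaving the dict lookup and the substring any()-scan per token.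
import Mathlib
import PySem

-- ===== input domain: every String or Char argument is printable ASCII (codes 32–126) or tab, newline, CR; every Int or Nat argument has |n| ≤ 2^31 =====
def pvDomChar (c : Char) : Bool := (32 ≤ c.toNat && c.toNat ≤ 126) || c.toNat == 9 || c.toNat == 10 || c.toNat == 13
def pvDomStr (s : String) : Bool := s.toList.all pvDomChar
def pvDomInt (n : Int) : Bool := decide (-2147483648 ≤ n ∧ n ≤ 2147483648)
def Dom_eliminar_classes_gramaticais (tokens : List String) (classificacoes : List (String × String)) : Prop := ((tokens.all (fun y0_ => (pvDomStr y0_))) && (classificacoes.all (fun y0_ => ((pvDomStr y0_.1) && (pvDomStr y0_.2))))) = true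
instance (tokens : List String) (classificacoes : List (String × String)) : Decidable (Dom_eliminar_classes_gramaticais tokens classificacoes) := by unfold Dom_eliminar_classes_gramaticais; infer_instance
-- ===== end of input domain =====

-- B builds the drop set in one pass over the dict items, then filters tokens by set membership (idiomatic; same return value, same cost class).
-- ===== PORT A =====
def CLASSES_GRAMATICAIS_INDESEJADAS : List String :=
  ["adv", "v-inf", "v-fin", "v-pcp", "v-ger", "num", "adj"]

def eliminar_classes_gramaticais (tokens : List String) (classificacoes : List (String × String)) : List String :=
  let d := PySem.Dict.ofList classificacoes
  tokens.foldl (fun tokens_filtrados token =>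
    if d.contains token then
      let classificacao := d.getD token ""
      if !(CLASSES_GRAMATICAIS_INDESEJADAS.any fun s => PySem.Str.isIn s classificacao) then
        tokens_filtrados ++ [token]
      else tokens_filtrados
    else tokens_filtrados ++ [token]) []

-- ===== PORT B =====
def eliminar_classes_gramaticais_alt (tokens : List String) (classificacoes : List (String × String)) : List String :=
  let drop : PySem.Set String :=
    PySem.Set.ofList (((PySem.Dict.ofList classificacoes).items.filter
      (fun p => CLASSES_GRAMATICAIS_INDESEJADAS.any fun s => PySem.Str.isIn s p.2)).map (fun p => p.1))
  tokens.filter (fun t => !(drop.contains t))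

-- ===== PRECONDITION & SPEC =====
def Spec_eliminar_classes_gramaticais (tokens : List String) (classificacoes : List (String × String)) (out : List String) : Prop := out = eliminar_classes_gramaticais_alt tokens classificacoes
instance (tokens : List String) (classificacoes : List (String × String)) (out : List String) : Decidable (Spec_eliminar_classes_gramaticais tokens classificacoes out) := by unfold Spec_eliminar_classes_gramaticais; infer_instance

-- ===== CLAIM (what is proved, stated in full; the proofs are below) =====
def Claim_equal_eliminar_classes_gramaticais : Prop := ∀ (tokens : List String) (classificacoes : List (String × String)), Dom_eliminar_classes_gramaticais tokens classificacoes → Spec_eliminar_classes_gramaticais tokens classificacoes (eliminar_classes_gramaticais tokens classificacoes)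

-- ===== LEMMAS AND PROOFS =====
-- per-token agreement: A's keep test equals non-membership in B's drop set
lemma keep_eq_not_drop (classificacoes : List (String × String)) (t : String) :
    (if (PySem.Dict.ofList classificacoes).contains t then
      (if !(CLASSES_GRAMATICAIS_INDESEJADAS.any fun s =>
          PySem.Str.isIn s ((PySem.Dict.ofList classificacoes).getD t "")) then true else false)
     else true)
    = !(PySem.Set.contains
        (PySem.Set.ofList (((PySem.Dict.ofList classificacoes).items.filter
          (fun p => CLASSES_GRAMATICAIS_INDESEJADAS.any fun s => PySem.Str.isIn s p.2)).map (fun p => p.1))) t) := by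
  have hnd := PySem.Dict.nodup_keys_ofList (κ := String) (ν := String) classificacoes
  set d := PySem.Dict.ofList classificacoes with hd
  rw [PySem.Dict.items_eq_map_keys d hnd ""]
  by_cases hc : d.contains t = true
  · have hk : t ∈ d.keys := (PySem.Dict.contains_iff_mem_keys d t).mp hc
    have hmem : (PySem.Set.ofList ((((d.keys.map (fun k => (k, d.getD k ""))).filter
          (fun p => CLASSES_GRAMATICAIS_INDESEJADAS.any fun s => PySem.Str.isIn s p.2))).map
          (fun p => p.1))).contains t
        = (CLASSES_GRAMATICAIS_INDESEJADAS.any fun s => PySem.Str.isIn s (d.getD t "")) := by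
      rw [Bool.eq_iff_iff]
      constructor
      · intro h
        have hm := (PySem.Set.contains_iff _ _).mp h
        rw [PySem.Set.mem_ofList] at hm
        obtain ⟨p, hp, hp1⟩ := List.mem_map.mp hm
        obtain ⟨hpm, hpred⟩ := List.mem_filter.mp hp
        obtain ⟨k, _, hpk⟩ := List.mem_map.mp hpm
        subst hpk; subst hp1
        exact hpred
      · intro h
        apply (PySem.Set.contains_iff _ _).mpr
        rw [PySem.Set.mem_ofList]
        refine List.mem_map.mpr ⟨(t, d.getD t ""), List.mem_filter.mpr ⟨List.mem_map.mpr ⟨t, hk, rfl⟩, h⟩, rfl⟩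
    rw [hmem, hc, if_pos rfl]
    cases hb : (CLASSES_GRAMATICAIS_INDESEJADAS.any fun s => PySem.Str.isIn s (d.getD t "")) <;> simp
  · have hc' : d.contains t = false := by simpa using hc
    have hk : t ∉ d.keys := fun h => by
      rw [(PySem.Dict.contains_iff_mem_keys d t).mpr h] at hc'; cases hc'
    have hmem : (PySem.Set.ofList ((((d.keys.map (fun k => (k, d.getD k ""))).filter
          (fun p => CLASSES_GRAMATICAIS_INDESEJADAS.any fun s => PySem.Str.isIn s p.2))).map
          (fun p => p.1))).contains t = false := by
      rw [Bool.eq_false_iff]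
      intro h
      have hm := (PySem.Set.contains_iff _ _).mp h
      rw [PySem.Set.mem_ofList] at hm
      obtain ⟨p, hp, hp1⟩ := List.mem_map.mp hm
      obtain ⟨hpm, _⟩ := List.mem_filter.mp hp
      obtain ⟨k, hkm, hpk⟩ := List.mem_map.mp hpm
      subst hpk; subst hp1
      exact hk hkm
    rw [hmem, hc', if_neg (by simp)]
    rfl

-- ===== VERDICT (by name: the statement is the Claim_ definition above) =====
theorem eliminar_classes_gramaticais_spec : Claim_equal_eliminar_classes_gramaticais := by
  intro tokens classificacoes _
  unfold Spec_eliminar_classes_gramaticais eliminar_classes_gramaticais eliminar_classes_gramaticais_alt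
  simp only []
  rw [show (fun (tokens_filtrados : List String) (token : String) =>
        if (PySem.Dict.ofList classificacoes).contains token then
          if !(CLASSES_GRAMATICAIS_INDESEJADAS.any fun s =>
              PySem.Str.isIn s ((PySem.Dict.ofList classificacoes).getD token "")) then
            tokens_filtrados ++ [token]
          else tokens_filtrados
        else tokens_filtrados ++ [token])
      = (fun (acc : List String) (token : String) =>
          if (!(PySem.Set.contains
              (PySem.Set.ofList (((PySem.Dict.ofList classificacoes).items.filter
                (fun p => CLASSES_GRAMATICAIS_INDESEJADAS.any fun s => PySem.Str.isIn s p.2)).map (fun p => p.1))) token) : Bool)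
          then acc ++ [token] else acc) from by
      funext acc token
      rw [← keep_eq_not_drop classificacoes token]
      by_cases h1 : (PySem.Dict.ofList classificacoes).contains token = true <;>
        simp [h1]]
  rw [PySem.List.foldl_append_if_eq_filter]
  simp
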